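-- pv_equiv track=rewrite | github.com/wilmurillo-ai/Design-Assistant | .skills/openclaw-skills/skills/jiachuan-1/tts-voice-ai/tts.py | select_voice
-- ===== SOURCE A (Python) =====
-- GOLDEN_VOICES = {
--     # 中文
--     "chinese_female_gentle": "girlfriend_5_speech02_01",
--     "chinese_female_playful": "girlfriend_1_speech02_01",
--     "chinese_female_energetic": "ttv-voice-2026011810595326-hxYkopxR",
--     "chinese_male": "ttv-voice-2026011806464526-IPLmlZ8C",
--     "chinese_male_humorous": "ttv-voice-2026011910402426-5fSKtVmM",
--
--     # 英文
--     "english_female": "english_voice_agent_ivc_female_nora",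
--     "english_male": "english_voice_agent_ivc_male_julian",
--     "english_female_maya": "english_voice_agent_ivc_female_maya",
--
--     # 粤语
--     "cantonese_female": "HK_Cantonese_female1",
--     "cantonese_male": "Cantonese_ProfessionalHost（M)",
--
--     # 台湾
--     "taiwan": "vc_wanwan_0303_01",
--
--     # 日语
--     "japanese_female": "Japanese_DecisivePrincess",
--     "japanese_male": "Japanese_IntellectualSenior",
--
--     # 韩语
--     "korean_female": "Korean_SweetGirl",
--     "korean_male": "Korean_StrictBoss",
-- }
--
-- VOICE_MAPPING = {
--     ("chinese", "female", "young", "gentle"): "girlfriend_5_speech02_01",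
--     ("chinese", "female", "young", "playful"): "girlfriend_1_speech02_01",
--     ("chinese", "female", "young", "energetic"): "ttv-voice-2026011810595326-hxYkopxR",
--     ("chinese", "female", "young"): "girlfriend_1_speech02_01",
--     ("chinese", "female", "middle"): "ttv-voice-2026011805455726-GZEh2lxO",
--     ("chinese", "female", "elder"): "ttv-voice-2026011803190026-eQrDK9f4",
--     ("chinese", "female"): "girlfriend_5_speech02_01",
--
--     ("chinese", "male", "young", "energetic"): "ttv-voice-2026011806464526-IPLmlZ8C",
--     ("chinese", "male", "middle", "humorous"): "ttv-voice-2026011910402426-5fSKtVmM",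
--     ("chinese", "male", "middle"): "ttv-voice-2026011809355426-eOpoATJe",
--     ("chinese", "male", "elder"): "ttv-voice-2026011913000426-5s6vR4kU",
--     ("chinese", "male"): "ttv-voice-2026011806464526-IPLmlZ8C",
--
--     # 粤语
--     ("cantonese", "female"): "HK_Cantonese_female1",
--     ("cantonese", "male"): "Cantonese_ProfessionalHost（M)",
--
--     ("english", "female"): "english_voice_agent_ivc_female_nora",
--     ("english", "female", "young"): "english_voice_agent_ivc_female_maya",
--     ("english", "male"): "english_voice_agent_ivc_male_julian",
--     ("english", "male", "young"): "english_voice_agent_ivc_male_leo",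
--
--     ("taiwan",): "vc_wanwan_0303_01",
--
--     ("japanese", "female"): "Japanese_DecisivePrincess",
--     ("japanese", "male"): "Japanese_IntellectualSenior",
--
--     ("korean", "female"): "Korean_SweetGirl",
--     ("korean", "male"): "Korean_StrictBoss",
-- }
--
-- DEFAULT_VOICES = {
--     "cn": "girlfriend_5_speech02_01",
--     "int": "english_voice_agent_ivc_female_nora",
-- }
--
-- def select_voice(language: str = None, gender: str = None, age: str = None, style: str = None, api_version: str = "cn") -> str:
--     if language or gender or age or style:
--         params = []
--         if language: params.append(language.lower())
--         if gender: params.append(gender.lower())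
--         if age: params.append(age.lower())
--         if style: params.append(style.lower())
--
--         key = tuple(params)
--         if key in VOICE_MAPPING:
--             return VOICE_MAPPING[key]
--
--         for i in range(len(params), 0, -1):
--             partial_key = tuple(params[:i])
--             for k, v in VOICE_MAPPING.items():
--                 if k[:len(partial_key)] == partial_key:
--                     return v
--
--     if language:
--         lang_key = f"{language}_female"
--         if gender:
--             lang_key = f"{language}_{gender}"
--         if lang_key in GOLDEN_VOICES:
--             return GOLDEN_VOICES[lang_key]
--
--     return DEFAULT_VOICES.get(api_version, "girlfriend_5_speech02_01")
-- ===== SOURCE B (Python) =====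
-- GOLDEN_VOICES = {
--     "chinese_female_gentle": "girlfriend_5_speech02_01",
--     "chinese_female_playful": "girlfriend_1_speech02_01",
--     "chinese_female_energetic": "ttv-voice-2026011810595326-hxYkopxR",
--     "chinese_male": "ttv-voice-2026011806464526-IPLmlZ8C",
--     "chinese_male_humorous": "ttv-voice-2026011910402426-5fSKtVmM",
--     "english_female": "english_voice_agent_ivc_female_nora",
--     "english_male": "english_voice_agent_ivc_male_julian",
--     "english_female_maya": "english_voice_agent_ivc_female_maya",
--     "cantonese_female": "HK_Cantonese_female1",
--     "cantonese_male": "Cantonese_ProfessionalHost（M)",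
--     "taiwan": "vc_wanwan_0303_01",
--     "japanese_female": "Japanese_DecisivePrincess",
--     "japanese_male": "Japanese_IntellectualSenior",
--     "korean_female": "Korean_SweetGirl",
--     "korean_male": "Korean_StrictBoss",
-- }
--
-- VOICE_MAPPING = {
--     ("chinese", "female", "young", "gentle"): "girlfriend_5_speech02_01",
--     ("chinese", "female", "young", "playful"): "girlfriend_1_speech02_01",
--     ("chinese", "female", "young", "energetic"): "ttv-voice-2026011810595326-hxYkopxR",
--     ("chinese", "female", "young"): "girlfriend_1_speech02_01",
--     ("chinese", "female", "middle"): "ttv-voice-2026011805455726-GZEh2lxO",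
--     ("chinese", "female", "elder"): "ttv-voice-2026011803190026-eQrDK9f4",
--     ("chinese", "female"): "girlfriend_5_speech02_01",
--     ("chinese", "male", "young", "energetic"): "ttv-voice-2026011806464526-IPLmlZ8C",
--     ("chinese", "male", "middle", "humorous"): "ttv-voice-2026011910402426-5fSKtVmM",
--     ("chinese", "male", "middle"): "ttv-voice-2026011809355426-eOpoATJe",
--     ("chinese", "male", "elder"): "ttv-voice-2026011913000426-5s6vR4kU",
--     ("chinese", "male"): "ttv-voice-2026011806464526-IPLmlZ8C",
--     ("cantonese", "female"): "HK_Cantonese_female1",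
--     ("cantonese", "male"): "Cantonese_ProfessionalHost（M)",
--     ("english", "female"): "english_voice_agent_ivc_female_nora",
--     ("english", "female", "young"): "english_voice_agent_ivc_female_maya",
--     ("english", "male"): "english_voice_agent_ivc_male_julian",
--     ("english", "male", "young"): "english_voice_agent_ivc_male_leo",
--     ("taiwan",): "vc_wanwan_0303_01",
--     ("japanese", "female"): "Japanese_DecisivePrincess",
--     ("japanese", "male"): "Japanese_IntellectualSenior",
--     ("korean", "female"): "Korean_SweetGirl",
--     ("korean", "male"): "Korean_StrictBoss",
-- }
--
-- DEFAULT_VOICES = {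
--     "cn": "girlfriend_5_speech02_01",
--     "int": "english_voice_agent_ivc_female_nora",
-- }
--
-- def select_voice(language: str = None, gender: str = None, age: str = None, style: str = None, api_version: str = "cn") -> str:
--     params = [p.lower() for p in (language, gender, age, style) if p]
--     if params:
--         key = tuple(params)
--         if key in VOICE_MAPPING:
--             return VOICE_MAPPING[key]
--         # single pass: pick the first entry with the longest common prefix (>= 1)
--         best, best_len = None, 0
--         for k, v in VOICE_MAPPING.items():
--             n = 0
--             while n < len(k) and n < len(params) and k[n] == params[n]:
--                 n += 1
--             if n > best_len:
--                 best_len, best = n, v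
--         if best is not None:
--             return best
--     if language:
--         lang_key = f"{language}_{gender or 'female'}"
--         if lang_key in GOLDEN_VOICES:
--             return GOLDEN_VOICES[lang_key]
--     return DEFAULT_VOICES.get(api_version, "girlfriend_5_speech02_01")
-- ===== Notes on version B (the rewrite author's own statement) =====
-- stated objective: alternative
-- what changed: A's descending-prefix-length outer loop, which rescans VOICE_MAPPING once per prefix length (up to 4 passes), is replaced by a single pass over VOICE_MAPPING tracking the first entry with the maximal common-prefix length against params (strict improvement keeps insertion-order tie-breaking); the exact-match lookup and the GOLDEN/DEFAULT fallback tail are kept.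
import Mathlib
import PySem

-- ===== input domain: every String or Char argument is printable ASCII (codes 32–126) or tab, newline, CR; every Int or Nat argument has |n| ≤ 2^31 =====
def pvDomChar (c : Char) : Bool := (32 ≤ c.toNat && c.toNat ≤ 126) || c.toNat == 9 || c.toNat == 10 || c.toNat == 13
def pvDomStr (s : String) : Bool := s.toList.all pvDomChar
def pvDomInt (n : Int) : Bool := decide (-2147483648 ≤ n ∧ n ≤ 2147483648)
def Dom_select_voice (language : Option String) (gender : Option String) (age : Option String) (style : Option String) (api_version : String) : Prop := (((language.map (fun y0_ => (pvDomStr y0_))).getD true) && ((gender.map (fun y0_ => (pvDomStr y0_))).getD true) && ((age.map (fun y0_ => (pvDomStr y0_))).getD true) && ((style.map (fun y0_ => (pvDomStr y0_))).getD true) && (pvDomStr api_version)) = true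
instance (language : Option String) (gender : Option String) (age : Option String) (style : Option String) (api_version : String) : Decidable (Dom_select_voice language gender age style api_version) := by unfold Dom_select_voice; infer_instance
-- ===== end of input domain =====

-- B replaces A's nested "for i in range(len(params),0,-1)" prefix search (up to 4 scans of the
-- mapping) by ONE pass tracking the first entry with the maximal common-prefix length; the
-- exact-match lookup and the GOLDEN/DEFAULT tail are kept.

-- shared module constants (identical dict literals in both Pythons)
def GOLDEN_VOICES : List (String × String) := [
  ("chinese_female_gentle", "girlfriend_5_speech02_01"),
  ("chinese_female_playful", "girlfriend_1_speech02_01"),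
  ("chinese_female_energetic", "ttv-voice-2026011810595326-hxYkopxR"),
  ("chinese_male", "ttv-voice-2026011806464526-IPLmlZ8C"),
  ("chinese_male_humorous", "ttv-voice-2026011910402426-5fSKtVmM"),
  ("english_female", "english_voice_agent_ivc_female_nora"),
  ("english_male", "english_voice_agent_ivc_male_julian"),
  ("english_female_maya", "english_voice_agent_ivc_female_maya"),
  ("cantonese_female", "HK_Cantonese_female1"),
  ("cantonese_male", "Cantonese_ProfessionalHost（M)"),
  ("taiwan", "vc_wanwan_0303_01"),
  ("japanese_female", "Japanese_DecisivePrincess"),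
  ("japanese_male", "Japanese_IntellectualSenior"),
  ("korean_female", "Korean_SweetGirl"),
  ("korean_male", "Korean_StrictBoss")]

def VOICE_MAPPING : List (List String × String) := [
  (["chinese", "female", "young", "gentle"], "girlfriend_5_speech02_01"),
  (["chinese", "female", "young", "playful"], "girlfriend_1_speech02_01"),
  (["chinese", "female", "young", "energetic"], "ttv-voice-2026011810595326-hxYkopxR"),
  (["chinese", "female", "young"], "girlfriend_1_speech02_01"),
  (["chinese", "female", "middle"], "ttv-voice-2026011805455726-GZEh2lxO"),
  (["chinese", "female", "elder"], "ttv-voice-2026011803190026-eQrDK9f4"),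
  (["chinese", "female"], "girlfriend_5_speech02_01"),
  (["chinese", "male", "young", "energetic"], "ttv-voice-2026011806464526-IPLmlZ8C"),
  (["chinese", "male", "middle", "humorous"], "ttv-voice-2026011910402426-5fSKtVmM"),
  (["chinese", "male", "middle"], "ttv-voice-2026011809355426-eOpoATJe"),
  (["chinese", "male", "elder"], "ttv-voice-2026011913000426-5s6vR4kU"),
  (["chinese", "male"], "ttv-voice-2026011806464526-IPLmlZ8C"),
  (["cantonese", "female"], "HK_Cantonese_female1"),
  (["cantonese", "male"], "Cantonese_ProfessionalHost（M)"),
  (["english", "female"], "english_voice_agent_ivc_female_nora"),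
  (["english", "female", "young"], "english_voice_agent_ivc_female_maya"),
  (["english", "male"], "english_voice_agent_ivc_male_julian"),
  (["english", "male", "young"], "english_voice_agent_ivc_male_leo"),
  (["taiwan"], "vc_wanwan_0303_01"),
  (["japanese", "female"], "Japanese_DecisivePrincess"),
  (["japanese", "male"], "Japanese_IntellectualSenior"),
  (["korean", "female"], "Korean_SweetGirl"),
  (["korean", "male"], "Korean_StrictBoss")]

def DEFAULT_VOICES : List (String × String) := [
  ("cn", "girlfriend_5_speech02_01"),
  ("int", "english_voice_agent_ivc_female_nora")]

-- Python truthiness of an optional string: not None and not ""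
def pyTruthy : Option String → Bool
  | none => false
  | some s => s ≠ ""

-- ===== PORT A =====
-- "if x: params.append(x.lower())" — the chunk a single optional argument contributes
def aParamOf : Option String → List String
  | none => []
  | some s => if s = "" then [] else [PySem.Str.lower s]

-- inner "for k, v in VOICE_MAPPING.items(): if k[:len(partial_key)] == partial_key: return v"
def aFindPrefix (params : List String) (i : Nat) (m : List (List String × String)) : Option String :=
  (m.find? (fun kv => kv.1.take (params.take i).length == params.take i)).map (·.2)

-- outer "for i in range(len(params), 0, -1)"
def aLoop (params : List String) (m : List (List String × String)) : Nat → Option String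
  | 0 => none
  | i + 1 =>
    match aFindPrefix params (i + 1) m with
    | some v => some v
    | none => aLoop params m i

-- the final "if language: … GOLDEN_VOICES … / return DEFAULT_VOICES.get(...)"
def aTail (language gender : Option String) (api_version : String) : String :=
  let golden : Option String :=
    if pyTruthy language then
      let lang_key := if pyTruthy gender
        then language.getD "" ++ "_" ++ gender.getD ""
        else language.getD "" ++ "_female"
      (GOLDEN_VOICES.find? (fun kv => kv.1 == lang_key)).map (·.2)
    else none
  match golden with
  | some v => v
  | none => ((DEFAULT_VOICES.find? (fun kv => kv.1 == api_version)).map (·.2)).getD "girlfriend_5_speech02_01"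

def select_voice (language : Option String) (gender : Option String) (age : Option String) (style : Option String) (api_version : String) : String :=
  if pyTruthy language || pyTruthy gender || pyTruthy age || pyTruthy style then
    let params := aParamOf language ++ aParamOf gender ++ aParamOf age ++ aParamOf style
    match VOICE_MAPPING.find? (fun kv => kv.1 == params) with
    | some kv => kv.2
    | none =>
      match aLoop params VOICE_MAPPING params.length with
      | some v => v
      | none => aTail language gender api_version
  else aTail language gender api_version

-- ===== PORT B =====
-- the inner while loop: common-prefix length of the entry key and params
def bLcp : List String → List String → Nat
  | a :: as, b :: bs => if a = b then bLcp as bs + 1 else 0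
  | _, _ => 0

-- the single pass: keep the first entry with strictly larger common prefix
def bScan (params : List String) : List (List String × String) → Nat → Option String → Option String
  | [], _, best => best
  | kv :: rest, bestLen, best =>
    let n := bLcp kv.1 params
    if bestLen < n then bScan params rest n (some kv.2)
    else bScan params rest bestLen best

def bTail (language gender : Option String) (api_version : String) : String :=
  let fallback := ((DEFAULT_VOICES.find? (fun kv => kv.1 == api_version)).map (·.2)).getD "girlfriend_5_speech02_01"
  if pyTruthy language then
    let lang_key := language.getD "" ++ "_" ++ (if pyTruthy gender then gender.getD "" else "female")
    match GOLDEN_VOICES.find? (fun kv => kv.1 == lang_key) with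
    | some kv => kv.2
    | none => fallback
  else fallback

def select_voice_alt (language : Option String) (gender : Option String) (age : Option String) (style : Option String) (api_version : String) : String :=
  let params := [language, gender, age, style].filterMap
    (fun o => match o with
      | some s => if s = "" then none else some (PySem.Str.lower s)
      | none => none)
  if params = [] then bTail language gender api_version
  else
    match VOICE_MAPPING.find? (fun kv => kv.1 == params) with
    | some kv => kv.2
    | none =>
      match bScan params VOICE_MAPPING 0 none with
      | some v => v
      | none => bTail language gender api_version

-- ===== PRECONDITION & SPEC =====
def Spec_select_voice (language : Option String) (gender : Option String) (age : Option String) (style : Option String) (api_version : String) (out : String) : Prop := out = select_voice_alt language gender age style api_version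
instance (language : Option String) (gender : Option String) (age : Option String) (style : Option String) (api_version : String) (out : String) : Decidable (Spec_select_voice language gender age style api_version out) := by unfold Spec_select_voice; infer_instance

-- ===== CLAIM (what is proved, stated in full; the proofs are below) =====
def Claim_equal_select_voice : Prop := ∀ (language : Option String) (gender : Option String) (age : Option String) (style : Option String) (api_version : String), Dom_select_voice language gender age style api_version → Spec_select_voice language gender age style api_version (select_voice language gender age style api_version)

-- ===== LEMMAS AND PROOFS =====

def maxLcp (params : List String) : List (List String × String) → Nat
  | [] => 0
  | kv :: m => max (bLcp kv.1 params) (maxLcp params m)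

theorem find?_congr' {α : Type} (l : List α) (p q : α → Bool)
    (h : ∀ x ∈ l, p x = q x) : l.find? p = l.find? q := by
  induction l with
  | nil => rfl
  | cons a l ih =>
    simp only [List.find?_cons, h a (List.mem_cons_self ..)]
    cases q a with
    | true => rfl
    | false => exact ih fun x hx => h x (List.mem_cons_of_mem _ hx)

theorem bLcp_le (k p : List String) : bLcp k p ≤ p.length := by
  induction k generalizing p with
  | nil => simp [bLcp]
  | cons a ks ih =>
    cases p with
    | nil => simp [bLcp]
    | cons b ps =>
      simp only [bLcp, List.length_cons]
      split
      · have := ih ps; omega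
      · omega

theorem take_eq_iff (k p : List String) (i : Nat) (hi : i ≤ p.length) :
    (k.take i = p.take i) ↔ i ≤ bLcp k p := by
  induction i generalizing k p with
  | zero => simp
  | succ n ih =>
    cases p with
    | nil => simp at hi
    | cons b ps =>
      cases k with
      | nil =>
        simp only [List.take_nil, bLcp]
        constructor
        · intro h; exact absurd h.symm (by simp)
        · omega
      | cons a ks =>
        simp only [List.take_succ_cons, bLcp, List.cons.injEq]
        by_cases hab : a = b
        · rw [if_pos hab, ih ks ps (by simpa using hi)]
          simp only [hab, true_and]
          omega
        · rw [if_neg hab]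
          constructor
          · rintro ⟨h, -⟩; exact absurd h hab
          · omega

theorem maxLcp_le (p : List String) (m : List (List String × String)) :
    maxLcp p m ≤ p.length := by
  induction m with
  | nil => simp [maxLcp]
  | cons kv m ih =>
    simp only [maxLcp]
    have := bLcp_le kv.1 p
    omega

theorem bLcp_le_maxLcp (p : List String) (m : List (List String × String))
    (kv : List String × String) (h : kv ∈ m) : bLcp kv.1 p ≤ maxLcp p m := by
  induction m with
  | nil => simp at h
  | cons e m ih =>
    simp only [maxLcp]
    rcases List.mem_cons.mp h with h | h
    · subst h; omega
    · have := ih h; omega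

theorem exists_maxLcp (p : List String) (m : List (List String × String))
    (h : 0 < maxLcp p m) : ∃ kv ∈ m, maxLcp p m ≤ bLcp kv.1 p := by
  induction m with
  | nil => simp [maxLcp] at h
  | cons e m ih =>
    simp only [maxLcp] at h ⊢
    by_cases he : maxLcp p m ≤ bLcp e.1 p
    · exact ⟨e, List.mem_cons_self .., by omega⟩
    · obtain ⟨kv, hkv, hle⟩ := ih (by omega)
      exact ⟨kv, List.mem_cons_of_mem _ hkv, by omega⟩

theorem aLoop_spec (p : List String) (m : List (List String × String)) (n : Nat)
    (hM : maxLcp p m ≤ n) (hn : n ≤ p.length) :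
    aLoop p m n = if maxLcp p m = 0 then none
      else (m.find? (fun kv => decide (maxLcp p m ≤ bLcp kv.1 p))).map (·.2) := by
  induction n with
  | zero => simp [aLoop]; omega
  | succ n ih =>
    have hlen : (p.take (n + 1)).length = n + 1 := by
      simp [List.length_take]; omega
    by_cases hcase : maxLcp p m ≤ n
    · have hnone : m.find? (fun kv => kv.1.take (p.take (n+1)).length == p.take (n+1)) = none := by
        apply List.find?_eq_none.mpr
        intro kv hkv
        rw [hlen]
        simp only [beq_iff_eq]
        intro heq
        have := (take_eq_iff kv.1 p (n+1) (by omega)).mp heq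
        have := bLcp_le_maxLcp p m kv hkv
        omega
      simp only [aLoop, aFindPrefix, hnone, Option.map_none]
      exact ih hcase (by omega)
    · have hMeq : maxLcp p m = n + 1 := by omega
      have hfc : m.find? (fun kv => kv.1.take (p.take (n+1)).length == p.take (n+1))
          = m.find? (fun kv => decide (maxLcp p m ≤ bLcp kv.1 p)) := by
        apply find?_congr'
        intro kv _
        rw [hlen, Bool.eq_iff_iff]
        simp only [beq_iff_eq, decide_eq_true_eq, hMeq]
        exact take_eq_iff kv.1 p (n+1) (by omega)
      obtain ⟨kv, hkv, hle⟩ := exists_maxLcp p m (by omega)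
      have hsome : (m.find? (fun kv => decide (maxLcp p m ≤ bLcp kv.1 p))).isSome := by
        rw [List.find?_isSome]
        exact ⟨kv, hkv, by simpa using hle⟩
      obtain ⟨kv', hkv'⟩ := Option.isSome_iff_exists.mp hsome
      have hMne : maxLcp p m ≠ 0 := by omega
      simp only [aLoop, aFindPrefix, hfc, hkv', Option.map_some]
      rw [if_neg hMne]

theorem bScan_spec (p : List String) (m : List (List String × String))
    (bl : Nat) (acc : Option String) :
    bScan p m bl acc = if maxLcp p m ≤ bl then acc
      else (m.find? (fun kv => decide (maxLcp p m ≤ bLcp kv.1 p))).map (·.2) := by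
  induction m generalizing bl acc with
  | nil => simp [bScan, maxLcp]
  | cons e m ih =>
    simp only [bScan, maxLcp]
    by_cases h1 : bl < bLcp e.1 p
    · rw [if_pos h1, ih]
      by_cases h2 : maxLcp p m ≤ bLcp e.1 p
      · rw [if_pos h2, if_neg (by omega), List.find?_cons_of_pos (by simp; omega)]
        simp
      · simp only [Nat.max_eq_right (by omega : bLcp e.1 p ≤ maxLcp p m)]
        rw [if_neg h2, if_neg (by omega), List.find?_cons_of_neg (by simp; omega)]
    · rw [if_neg h1, ih]
      by_cases h2 : maxLcp p m ≤ bl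
      · rw [if_pos h2, if_pos (by omega)]
      · simp only [Nat.max_eq_right (by omega : bLcp e.1 p ≤ maxLcp p m)]
        rw [if_neg h2, if_neg h2, List.find?_cons_of_neg (by simp; omega)]

theorem params_eq (l g a s : Option String) :
    List.filterMap (fun o => match o with
      | some s => if s = "" then none else some (PySem.Str.lower s)
      | none => none) [l, g, a, s]
    = aParamOf l ++ aParamOf g ++ aParamOf a ++ aParamOf s := by
  rcases l with _ | l <;> rcases g with _ | g <;> rcases a with _ | a <;> rcases s with _ | s <;>
    simp only [List.filterMap_cons, List.filterMap_nil, aParamOf] <;>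
    first
      | (split_ifs <;> simp)
      | simp

theorem aParamOf_nil (o : Option String) : aParamOf o = [] ↔ pyTruthy o = false := by
  cases o with
  | none => simp [aParamOf, pyTruthy]
  | some s => by_cases h : s = "" <;> simp [aParamOf, pyTruthy, h]

theorem tail_eq (l g : Option String) (api : String) : aTail l g api = bTail l g api := by
  unfold aTail bTail
  by_cases hl : pyTruthy l = true
  · simp only [hl, if_true]
    have hk : (if pyTruthy g then l.getD "" ++ "_" ++ g.getD "" else l.getD "" ++ "_female")
        = l.getD "" ++ "_" ++ (if pyTruthy g then g.getD "" else "female") := by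
      by_cases hg : pyTruthy g = true
      · simp [hg]
      · simp only [hg]
        simp only [Bool.false_eq_true, if_false]
        have : ("_female" : String) = "_" ++ "female" := by decide
        rw [this, ← String.append_assoc]
    rw [hk]
    cases GOLDEN_VOICES.find? (fun kv => kv.1 == l.getD "" ++ "_" ++ (if pyTruthy g then g.getD "" else "female")) <;> rfl
  · simp only [Bool.not_eq_true] at hl
    simp [hl]

theorem core_eq (language gender age style : Option String) (api_version : String)
    (P Q : List String)
    (hP : P = aParamOf language ++ aParamOf gender ++ aParamOf age ++ aParamOf style)
    (hQ : Q = List.filterMap (fun o => match o with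
      | some s => if s = "" then none else some (PySem.Str.lower s)
      | none => none) [language, gender, age, style]) :
    (if (pyTruthy language || pyTruthy gender || pyTruthy age || pyTruthy style) = true then
      match VOICE_MAPPING.find? (fun kv => kv.1 == P) with
      | some kv => kv.2
      | none =>
        match aLoop P VOICE_MAPPING P.length with
        | some v => v
        | none => aTail language gender api_version
    else aTail language gender api_version)
    = (if Q = [] then bTail language gender api_version
      else
        match VOICE_MAPPING.find? (fun kv => kv.1 == Q) with
        | some kv => kv.2
        | none =>
          match bScan Q VOICE_MAPPING 0 none with
          | some v => v
          | none => bTail language gender api_version) := by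
  have hQP : Q = P := by rw [hQ, hP, params_eq]
  subst hQP
  by_cases hguard : (pyTruthy language || pyTruthy gender || pyTruthy age || pyTruthy style) = true
  · have hne : Q ≠ [] := by
      rw [hP]
      rcases Bool.or_eq_true .. |>.mp hguard with h | h
      · rcases Bool.or_eq_true .. |>.mp h with h | h
        · rcases Bool.or_eq_true .. |>.mp h with h | h
          · intro hnil
            have := List.append_eq_nil_iff.mp (List.append_eq_nil_iff.mp (List.append_eq_nil_iff.mp hnil).1).1
            have := (aParamOf_nil language).mp this.1
            simp [this] at h
          · intro hnil
            have := List.append_eq_nil_iff.mp (List.append_eq_nil_iff.mp (List.append_eq_nil_iff.mp hnil).1).1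
            have := (aParamOf_nil gender).mp this.2
            simp [this] at h
        · intro hnil
          have := List.append_eq_nil_iff.mp (List.append_eq_nil_iff.mp hnil).1
          have := (aParamOf_nil age).mp this.2
          simp [this] at h
      · intro hnil
        have := (aParamOf_nil style).mp (List.append_eq_nil_iff.mp hnil).2
        simp [this] at h
    rw [if_pos hguard, if_neg hne]
    cases hfind : VOICE_MAPPING.find? (fun kv => kv.1 == Q) with
    | some kv => rfl
    | none =>
      have hloop : aLoop Q VOICE_MAPPING Q.length
          = bScan Q VOICE_MAPPING 0 none := by
        rw [aLoop_spec Q VOICE_MAPPING Q.length (maxLcp_le Q VOICE_MAPPING) le_rfl,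
          bScan_spec]
        by_cases hz : maxLcp Q VOICE_MAPPING = 0
        · simp [hz]
        · rw [if_neg hz, if_neg (by omega)]
      rw [hloop]
      cases bScan Q VOICE_MAPPING 0 none with
      | some v => rfl
      | none => exact tail_eq language gender api_version
  · have hnil : Q = [] := by
      simp only [Bool.or_eq_true, not_or, Bool.not_eq_true] at hguard
      rw [hP, (aParamOf_nil language).mpr hguard.1.1.1, (aParamOf_nil gender).mpr hguard.1.1.2,
        (aParamOf_nil age).mpr hguard.1.2, (aParamOf_nil style).mpr hguard.2]
      rfl
    rw [if_neg hguard, if_pos hnil]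
    exact tail_eq language gender api_version

-- ===== VERDICT (by name: the statement is the Claim_ definition above) =====
theorem select_voice_spec : Claim_equal_select_voice := by
  intro language gender age style api_version _
  exact core_eq language gender age style api_version _ _ rfl rfl
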